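-- pv_equiv track=rewrite | github.com/ethereum/research | mimc_stark/better_lagrange.py | lagrange_interp_4
-- ===== SOURCE A (Python) =====
-- def inv(a, modulus):
--     if a == 0:
--         return 0
--     lm, hm = 1, 0
--     low, high = a % modulus, modulus
--     while low > 1:
--         r = high//low
--         nm, new = hm-lm*r, high-low*r
--         lm, low, hm, high = nm, new, lm, low
--     return lm % modulus
--
-- def eval_poly_at(poly, x, modulus):
--     o, p = 0, 1
--     for coeff in poly:
--         o += coeff * p
--         p = (p * x % modulus)
--     return o % modulus
--
-- def lagrange_interp_4(pieces, xs, modulus):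
--     x01, x02, x03, x12, x13, x23 = \
--         xs[0] * xs[1], xs[0] * xs[2], xs[0] * xs[3], xs[1] * xs[2], xs[1] * xs[3], xs[2] * xs[3]
--     eq0 = [-x12 * xs[3] % modulus, (x12 + x13 + x23), -xs[1]-xs[2]-xs[3], 1]
--     eq1 = [-x02 * xs[3] % modulus, (x02 + x03 + x23), -xs[0]-xs[2]-xs[3], 1]
--     eq2 = [-x01 * xs[3] % modulus, (x01 + x03 + x13), -xs[0]-xs[1]-xs[3], 1]
--     eq3 = [-x01 * xs[2] % modulus, (x01 + x02 + x12), -xs[0]-xs[1]-xs[2], 1]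
--     e0 = eval_poly_at(eq0, xs[0], modulus)
--     e1 = eval_poly_at(eq1, xs[1], modulus)
--     e2 = eval_poly_at(eq2, xs[2], modulus)
--     e3 = eval_poly_at(eq3, xs[3], modulus)
--     e01 = e0 * e1
--     e23 = e2 * e3
--     invall = inv(e01 * e23, modulus)
--     inv_y0 = pieces[0] * invall * e1 * e23 % modulus
--     inv_y1 = pieces[1] * invall * e0 * e23 % modulus
--     inv_y2 = pieces[2] * invall * e01 * e3 % modulus
--     inv_y3 = pieces[3] * invall * e01 * e2 % modulus
--     return [(eq0[i] * inv_y0 + eq1[i] * inv_y1 + eq2[i] * inv_y2 + eq3[i] * inv_y3) % modulus for i in range(4)]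
-- ===== SOURCE B (Python) =====
-- def inv(a, modulus):
--     if a == 0:
--         return 0
--     lm, hm = 1, 0
--     low, high = a % modulus, modulus
--     while low > 1:
--         r = high//low
--         nm, new = hm-lm*r, high-low*r
--         lm, low, hm, high = nm, new, lm, low
--     return lm % modulus
--
-- def eval_poly_at(poly, x, modulus):
--     o, p = 0, 1
--     for coeff in poly:
--         o += coeff * p
--         p = (p * x % modulus)
--     return o % modulus
--
-- def mul_by_linear(poly, xj):
--     # multiply poly (little-endian coefficients) by the linear factor (x - xj)
--     prev, out = 0, []
--     for c in poly:
--         out.append(prev - xj * c)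
--         prev = c
--     out.append(prev)
--     return out
--
-- def lagrange_interp_4(pieces, xs, modulus):
--     eqs = []
--     for i in range(4):
--         poly = [1]
--         for j in range(4):
--             if j != i:
--                 poly = mul_by_linear(poly, xs[j])
--         eqs.append(poly)
--     es = [eval_poly_at(eqs[i], xs[i], modulus) for i in range(4)]
--     e01 = es[0] * es[1]
--     e23 = es[2] * es[3]
--     invall = inv(e01 * e23, modulus)
--     ys = [pieces[0] * invall * es[1] * e23 % modulus,
--           pieces[1] * invall * es[0] * e23 % modulus,
--           pieces[2] * invall * e01 * es[3] % modulus,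
--           pieces[3] * invall * e01 * es[2] % modulus]
--     return [sum(eqs[i][k] * ys[i] for i in range(4)) % modulus for k in range(4)]
-- ===== Notes on version B (the rewrite author's own statement) =====
-- stated objective: alternative
-- what changed: B replaces A's four hand-expanded eq0..eq3 coefficient lists with a generic loop that builds each numerator cubic by convolving the linear factors (x - xs[j]) for j != i, then evaluates, batch-inverts and sums over the four rows with loops instead of unrolled arithmetic.
import Mathlib
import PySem

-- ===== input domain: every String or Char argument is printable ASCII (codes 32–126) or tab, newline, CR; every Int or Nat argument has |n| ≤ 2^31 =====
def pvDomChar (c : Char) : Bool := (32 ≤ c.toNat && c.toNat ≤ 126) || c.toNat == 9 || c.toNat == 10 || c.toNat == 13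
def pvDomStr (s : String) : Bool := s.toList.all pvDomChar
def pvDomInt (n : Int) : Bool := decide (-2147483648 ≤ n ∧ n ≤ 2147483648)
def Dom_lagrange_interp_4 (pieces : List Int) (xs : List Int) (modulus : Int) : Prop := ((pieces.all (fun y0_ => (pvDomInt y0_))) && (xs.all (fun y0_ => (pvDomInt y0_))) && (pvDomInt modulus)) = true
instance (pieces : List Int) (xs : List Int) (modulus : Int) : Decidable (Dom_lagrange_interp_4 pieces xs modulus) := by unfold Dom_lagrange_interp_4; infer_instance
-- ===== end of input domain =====

-- B replaces A's four hand-expanded coefficient lists by a generic loop that builds each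
-- numerator cubic by convolving linear factors (a different decomposition, same cost).

-- ===== PORT A =====
-- shared helper: Python's `inv` (extended-Euclid loop); the while loop as structural recursion
def pyInvLoop (lm low hm high : Int) : Int :=
  if h1lt : 1 < low then
    let r := PySem.Int.floordiv high low
    pyInvLoop (hm - lm * r) (high - low * r) lm low
  else lm
termination_by low.toNat
decreasing_by
  have h1 : PySem.Int.floordiv high low * low + PySem.Int.mod high low = high :=
    PySem.Int.floordiv_mul_add_mod high low
  have hge : 0 ≤ PySem.Int.mod high low := PySem.Int.mod_nonneg high (by omega)
  have h3 : PySem.Int.mod high low < low := PySem.Int.mod_lt high (by omega)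
  have h4 : high - low * PySem.Int.floordiv high low = PySem.Int.mod high low := by
    rw [mul_comm]; omega
  simp only [h4]; omega

def pyInv (a modulus : Int) : Int :=
  if a = 0 then 0
  else PySem.Int.mod (pyInvLoop 1 (PySem.Int.mod a modulus) 0 modulus) modulus

-- shared helper: Python's `eval_poly_at`
def pyEvalPolyAt (poly : List Int) (x modulus : Int) : Int :=
  let s := poly.foldl (fun (op : Int × Int) coeff =>
    (op.1 + coeff * op.2, PySem.Int.mod (op.2 * x) modulus)) (0, 1)
  PySem.Int.mod s.1 modulus

def lagrange_interp_4 (pieces : List Int) (xs : List Int) (modulus : Int) : List Int :=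
  let x0 := PySem.List.pyGetD xs 0 0
  let x1 := PySem.List.pyGetD xs 1 0
  let x2 := PySem.List.pyGetD xs 2 0
  let x3 := PySem.List.pyGetD xs 3 0
  let x01 := x0 * x1
  let x02 := x0 * x2
  let x03 := x0 * x3
  let x12 := x1 * x2
  let x13 := x1 * x3
  let x23 := x2 * x3
  let eq0 : List Int := [PySem.Int.mod (-x12 * x3) modulus, x12 + x13 + x23, -x1 - x2 - x3, 1]
  let eq1 : List Int := [PySem.Int.mod (-x02 * x3) modulus, x02 + x03 + x23, -x0 - x2 - x3, 1]
  let eq2 : List Int := [PySem.Int.mod (-x01 * x3) modulus, x01 + x03 + x13, -x0 - x1 - x3, 1]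
  let eq3 : List Int := [PySem.Int.mod (-x01 * x2) modulus, x01 + x02 + x12, -x0 - x1 - x2, 1]
  let e0 := pyEvalPolyAt eq0 x0 modulus
  let e1 := pyEvalPolyAt eq1 x1 modulus
  let e2 := pyEvalPolyAt eq2 x2 modulus
  let e3 := pyEvalPolyAt eq3 x3 modulus
  let e01 := e0 * e1
  let e23 := e2 * e3
  let invall := pyInv (e01 * e23) modulus
  let iy0 := PySem.Int.mod (PySem.List.pyGetD pieces 0 0 * invall * e1 * e23) modulus
  let iy1 := PySem.Int.mod (PySem.List.pyGetD pieces 1 0 * invall * e0 * e23) modulus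
  let iy2 := PySem.Int.mod (PySem.List.pyGetD pieces 2 0 * invall * e01 * e3) modulus
  let iy3 := PySem.Int.mod (PySem.List.pyGetD pieces 3 0 * invall * e01 * e2) modulus
  (PySem.List.pyRange 0 4 1).map (fun i =>
    PySem.Int.mod (PySem.List.pyGetD eq0 i 0 * iy0 + PySem.List.pyGetD eq1 i 0 * iy1 +
      PySem.List.pyGetD eq2 i 0 * iy2 + PySem.List.pyGetD eq3 i 0 * iy3) modulus)

-- ===== PORT B =====
-- Source B's mul_by_linear: multiply a coefficient list by (x - xj), as the same one-pass fold
def mulByLinear (poly : List Int) (xj : Int) : List Int :=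
  let s := poly.foldl (fun (acc : List Int × Int) c => (acc.1 ++ [acc.2 - xj * c], c)) ([], 0)
  s.1 ++ [s.2]

def lagrange_interp_4_alt (pieces : List Int) (xs : List Int) (modulus : Int) : List Int :=
  let eqs := (PySem.List.pyRange 0 4 1).foldl (fun (eqs : List (List Int)) i =>
      eqs ++ [(PySem.List.pyRange 0 4 1).foldl (fun poly j =>
        if j ≠ i then mulByLinear poly (PySem.List.pyGetD xs j 0) else poly) [1]]) []
  let es := (PySem.List.pyRange 0 4 1).map (fun i =>
      pyEvalPolyAt (PySem.List.pyGetD eqs i []) (PySem.List.pyGetD xs i 0) modulus)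
  let e01 := PySem.List.pyGetD es 0 0 * PySem.List.pyGetD es 1 0
  let e23 := PySem.List.pyGetD es 2 0 * PySem.List.pyGetD es 3 0
  let invall := pyInv (e01 * e23) modulus
  let ys : List Int := [
    PySem.Int.mod (PySem.List.pyGetD pieces 0 0 * invall * PySem.List.pyGetD es 1 0 * e23) modulus,
    PySem.Int.mod (PySem.List.pyGetD pieces 1 0 * invall * PySem.List.pyGetD es 0 0 * e23) modulus,
    PySem.Int.mod (PySem.List.pyGetD pieces 2 0 * invall * e01 * PySem.List.pyGetD es 3 0) modulus,
    PySem.Int.mod (PySem.List.pyGetD pieces 3 0 * invall * e01 * PySem.List.pyGetD es 2 0) modulus]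
  (PySem.List.pyRange 0 4 1).map (fun k =>
    PySem.Int.mod ((PySem.List.pyRange 0 4 1).foldl (fun acc i =>
      acc + PySem.List.pyGetD (PySem.List.pyGetD eqs i []) k 0 * PySem.List.pyGetD ys i 0) 0) modulus)

-- ===== PRECONDITION & SPEC =====
-- Pre_ excludes exactly where A raises: IndexError when pieces or xs has fewer than 4
-- elements, ZeroDivisionError when modulus = 0.
def Pre_lagrange_interp_4 (pieces : List Int) (xs : List Int) (modulus : Int) : Prop :=
  4 ≤ pieces.length ∧ 4 ≤ xs.length ∧ modulus ≠ 0
instance (pieces : List Int) (xs : List Int) (modulus : Int) : Decidable (Pre_lagrange_interp_4 pieces xs modulus) := by unfold Pre_lagrange_interp_4; infer_instance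
def pvWitness_lagrange_interp_4 : List Int × List Int × Int := ([1, 2, 3, 4], [0, 1, 2, 3], 7)

def Spec_lagrange_interp_4 (pieces : List Int) (xs : List Int) (modulus : Int) (out : List Int) : Prop := out = lagrange_interp_4_alt pieces xs modulus
instance (pieces : List Int) (xs : List Int) (modulus : Int) (out : List Int) : Decidable (Spec_lagrange_interp_4 pieces xs modulus out) := by unfold Spec_lagrange_interp_4; infer_instance

-- ===== CLAIM (what is proved, stated in full; the proofs are below) =====
def Claim_equal_lagrange_interp_4 : Prop := ∀ (pieces : List Int) (xs : List Int) (modulus : Int), Dom_lagrange_interp_4 pieces xs modulus → Pre_lagrange_interp_4 pieces xs modulus → Spec_lagrange_interp_4 pieces xs modulus (lagrange_interp_4 pieces xs modulus)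

-- ===== LEMMAS AND PROOFS =====

-- Python's % is constant on residue classes: if m ∣ a - b then a % m = b % m (any m ≠ 0).
lemma pyMod_congr (m a b : Int) (hm : m ≠ 0) (h : m ∣ a - b) :
    PySem.Int.mod a m = PySem.Int.mod b m := by
  have ha := PySem.Int.floordiv_mul_add_mod a m
  have hb := PySem.Int.floordiv_mul_add_mod b m
  obtain ⟨k, hk⟩ := h
  have hdvd : |m| ∣ PySem.Int.mod a m - PySem.Int.mod b m := by
    rw [abs_dvd]
    exact ⟨k - PySem.Int.floordiv a m + PySem.Int.floordiv b m, by linarith [hk, ha, hb, mul_comm m (k - PySem.Int.floordiv a m + PySem.Int.floordiv b m)]⟩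
  have habs : |PySem.Int.mod a m - PySem.Int.mod b m| < |m| := by
    rcases lt_or_gt_of_ne hm with hneg | hpos
    · have b1 := PySem.Int.mod_neg_bounds a hneg
      have b2 := PySem.Int.mod_neg_bounds b hneg
      rw [abs_of_neg hneg, abs_lt]; omega
    · have b1 := PySem.Int.mod_nonneg a hpos
      have b2 := PySem.Int.mod_lt a hpos
      have b3 := PySem.Int.mod_nonneg b hpos
      have b4 := PySem.Int.mod_lt b hpos
      rw [abs_of_pos hpos, abs_lt]; omega
  have := Int.eq_zero_of_abs_lt_dvd hdvd habs
  omega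

-- a % m differs from a by a multiple of m
lemma pyMod_sub_self_dvd (m a : Int) : m ∣ PySem.Int.mod a m - a := by
  have h := PySem.Int.floordiv_mul_add_mod a m
  exact ⟨-(PySem.Int.floordiv a m), by linarith [mul_comm m (-(PySem.Int.floordiv a m))]⟩

-- B's three chained linear convolutions expand to A's hand-written coefficient list
lemma numer3 (a b c : Int) :
    mulByLinear (mulByLinear (mulByLinear [1] a) b) c =
      [-(a * b) * c, a * b + a * c + b * c, -a - b - c, 1] := by
  simp [mulByLinear]
  and_intros <;> ring

-- evaluating a cubic whose constant terms agree mod m gives the same result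
lemma eval4_congr (m x c0 c0' c1 c2 c3 : Int) (hm : m ≠ 0) (h : m ∣ c0 - c0') :
    pyEvalPolyAt [c0, c1, c2, c3] x m = pyEvalPolyAt [c0', c1, c2, c3] x m := by
  simp only [pyEvalPolyAt, List.foldl]
  apply pyMod_congr _ _ _ hm
  obtain ⟨t, ht⟩ := h
  exact ⟨t, by linear_combination ht⟩

-- ===== VERDICT (by name: the statement is the Claim_ definition above) =====
set_option maxHeartbeats 2000000 in
theorem lagrange_interp_4_spec : Claim_equal_lagrange_interp_4 := by
  intro pieces xs modulus _ hpre
  obtain ⟨hp, hx, hm⟩ := hpre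
  obtain ⟨p0, p1, p2, p3, pr, rfl⟩ : ∃ a b c d l, pieces = a::b::c::d::l := by
    rcases pieces with _|⟨a,_|⟨b,_|⟨c,_|⟨d,l⟩⟩⟩⟩ <;> simp_all
  obtain ⟨x0, x1, x2, x3, xr, rfl⟩ : ∃ a b c d l, xs = a::b::c::d::l := by
    rcases xs with _|⟨a,_|⟨b,_|⟨c,_|⟨d,l⟩⟩⟩⟩ <;> simp_all
  have hr4 : PySem.List.pyRange 0 4 1 = [0,1,2,3] := by decide
  show lagrange_interp_4 _ _ _ = lagrange_interp_4_alt _ _ _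
  simp only [lagrange_interp_4, lagrange_interp_4_alt, hr4, List.foldl, List.map,
    PySem.List.pyGetD_ofNat', List.getD_cons_zero, List.getD_cons_succ, ne_eq,
    Int.reduceEq, not_true, not_false_eq_true, ite_true, ite_false, List.nil_append, List.cons_append,
    numer3]
  have he0 : pyEvalPolyAt [PySem.Int.mod (-(x1 * x2) * x3) modulus, x1 * x2 + x1 * x3 + x2 * x3, -x1 - x2 - x3, 1] x0 modulus = pyEvalPolyAt [-(x1 * x2) * x3, x1 * x2 + x1 * x3 + x2 * x3, -x1 - x2 - x3, 1] x0 modulus :=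
    eval4_congr _ _ _ _ _ _ _ hm (pyMod_sub_self_dvd _ _)
  have he1 : pyEvalPolyAt [PySem.Int.mod (-(x0 * x2) * x3) modulus, x0 * x2 + x0 * x3 + x2 * x3, -x0 - x2 - x3, 1] x1 modulus = pyEvalPolyAt [-(x0 * x2) * x3, x0 * x2 + x0 * x3 + x2 * x3, -x0 - x2 - x3, 1] x1 modulus :=
    eval4_congr _ _ _ _ _ _ _ hm (pyMod_sub_self_dvd _ _)
  have he2 : pyEvalPolyAt [PySem.Int.mod (-(x0 * x1) * x3) modulus, x0 * x1 + x0 * x3 + x1 * x3, -x0 - x1 - x3, 1] x2 modulus = pyEvalPolyAt [-(x0 * x1) * x3, x0 * x1 + x0 * x3 + x1 * x3, -x0 - x1 - x3, 1] x2 modulus :=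
    eval4_congr _ _ _ _ _ _ _ hm (pyMod_sub_self_dvd _ _)
  have he3 : pyEvalPolyAt [PySem.Int.mod (-(x0 * x1) * x2) modulus, x0 * x1 + x0 * x2 + x1 * x2, -x0 - x1 - x2, 1] x3 modulus = pyEvalPolyAt [-(x0 * x1) * x2, x0 * x1 + x0 * x2 + x1 * x2, -x0 - x1 - x2, 1] x3 modulus :=
    eval4_congr _ _ _ _ _ _ _ hm (pyMod_sub_self_dvd _ _)
  rw [he0, he1, he2, he3]
  generalize pyEvalPolyAt [-(x1 * x2) * x3, x1 * x2 + x1 * x3 + x2 * x3, -x1 - x2 - x3, 1] x0 modulus = E0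
  generalize pyEvalPolyAt [-(x0 * x2) * x3, x0 * x2 + x0 * x3 + x2 * x3, -x0 - x2 - x3, 1] x1 modulus = E1
  generalize pyEvalPolyAt [-(x0 * x1) * x3, x0 * x1 + x0 * x3 + x1 * x3, -x0 - x1 - x3, 1] x2 modulus = E2
  generalize pyEvalPolyAt [-(x0 * x1) * x2, x0 * x1 + x0 * x2 + x1 * x2, -x0 - x1 - x2, 1] x3 modulus = E3
  generalize pyInv (E0 * E1 * (E2 * E3)) modulus = V
  generalize PySem.Int.mod (p0 * V * E1 * (E2 * E3)) modulus = Y0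
  generalize PySem.Int.mod (p1 * V * E0 * (E2 * E3)) modulus = Y1
  generalize PySem.Int.mod (p2 * V * (E0 * E1) * E3) modulus = Y2
  generalize PySem.Int.mod (p3 * V * (E0 * E1) * E2) modulus = Y3
  simp only [List.cons.injEq, and_true]
  refine ⟨?_, ?_, ?_, ?_⟩
  · apply pyMod_congr _ _ _ hm
    obtain ⟨t0, ht0⟩ := pyMod_sub_self_dvd modulus (-(x1 * x2) * x3)
    obtain ⟨t1, ht1⟩ := pyMod_sub_self_dvd modulus (-(x0 * x2) * x3)
    obtain ⟨t2, ht2⟩ := pyMod_sub_self_dvd modulus (-(x0 * x1) * x3)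
    obtain ⟨t3, ht3⟩ := pyMod_sub_self_dvd modulus (-(x0 * x1) * x2)
    exact ⟨t0 * Y0 + t1 * Y1 + t2 * Y2 + t3 * Y3,
      by linear_combination Y0 * ht0 + Y1 * ht1 + Y2 * ht2 + Y3 * ht3⟩
  · congr 1; ring
  · congr 1; ring
  · congr 1; ring
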